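-- pv_equiv track=rewrite | github.com/star6973/algorithm-practice | Programmers/solved/땅따먹기(☆).py | solution
-- ===== SOURCE A (Python) =====
-- def solution(land):
--     answer = []
--     for i in range(len(land)):
--         for j in range(len(land[i])):
--             if i != 0:
--                 land[i][j] += max(land[i-1][:j] + land[i-1][j+1:])
--
--     answer = max(land[-1])
--     return answer
-- ===== SOURCE B (Python) =====
-- def solution(land):
--     prev = list(land[0])
--     for row in land[1:]:
--         m1 = max(prev)
--         i1 = prev.index(m1)
--         m2 = max(prev[:i1] + prev[i1 + 1:]) if len(prev) > 1 else None
--         prev = [v + (m2 if j == i1 else m1) for j, v in enumerate(row)]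
--     return max(prev)
-- ===== Notes on version B (the rewrite author's own statement) =====
-- stated objective: faster
-- what changed: B keeps only the previous accumulated row and computes its max, argmax and second max once per row, picking per cell max-or-second-max instead of A's per-cell slice-and-max scan; asymptotically O(rows*cols) vs A's O(rows*cols^2).
import Mathlib
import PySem

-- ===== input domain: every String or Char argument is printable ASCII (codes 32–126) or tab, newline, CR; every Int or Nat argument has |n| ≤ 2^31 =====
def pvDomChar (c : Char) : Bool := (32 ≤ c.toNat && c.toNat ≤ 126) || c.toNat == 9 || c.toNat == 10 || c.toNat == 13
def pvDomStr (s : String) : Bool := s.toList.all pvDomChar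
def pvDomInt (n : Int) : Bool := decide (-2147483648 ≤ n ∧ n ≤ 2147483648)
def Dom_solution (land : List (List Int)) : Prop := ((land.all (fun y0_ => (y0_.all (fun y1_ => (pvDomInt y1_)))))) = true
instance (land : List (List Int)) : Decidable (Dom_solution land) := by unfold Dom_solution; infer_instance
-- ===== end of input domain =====

-- B replaces A's per-cell slice-and-max scan with once-per-row max/argmax/second-max;
-- equivalence is about the RETURN value only (Python A mutates `land` in place, B does not).

-- ===== PORT A =====
-- max(xs): Python raises ValueError on []; the default 0 is unreached under Pre_solution
def pvMax (xs : List Int) : Int := (PySem.List.max? xs (fun y => y)).getD 0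

def solution (land : List (List Int)) : Int :=
  let land' := (List.range land.length).foldl (fun L i =>
    (List.range ((L.getD i []).length)).foldl (fun L j =>
      if i ≠ 0 then
        let prev := L.getD (i - 1) []
        let row := L.getD i []
        -- land[i][j] += max(land[i-1][:j] + land[i-1][j+1:])
        L.set i (row.set j ((row.getD j 0) +
          pvMax (PySem.List.slice prev none (some (j : Int)) ++
                 PySem.List.slice prev (some ((j : Int) + 1)) none)))
      else L) L) land
  pvMax ((PySem.List.pyGet? land' (-1)).getD [])

-- ===== PORT B =====
def pvBestRow (prev row : List Int) : List Int :=
  let m1 := pvMax prev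
  let i1 := (PySem.List.index? prev m1).getD 0
  -- Python's m2 is None when len(prev) == 1; that None is never read under Pre_solution,
  -- 0 stands in for it here
  let m2 := if 1 < prev.length then
      pvMax (PySem.List.slice prev none (some (i1 : Int)) ++
             PySem.List.slice prev (some ((i1 : Int) + 1)) none)
    else 0
  (PySem.List.enumerate row).map (fun p => p.2 + (if p.1 = (i1 : Int) then m2 else m1))

def solution_alt (land : List (List Int)) : Int :=
  let prev0 := (PySem.List.pyGet? land 0).getD []
  let rest := PySem.List.slice land (some 1) none
  pvMax (rest.foldl (fun prev row => pvBestRow prev row) prev0)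

-- ===== PRECONDITION & SPEC =====
-- Pre_ excludes exactly the inputs where Python A raises: empty land / empty last row
-- (max of empty), or a cell whose previous row minus one column is empty (max of empty).
def Pre_solution (land : List (List Int)) : Prop :=
  land ≠ [] ∧ (land.getLast?.getD []) ≠ [] ∧
  ∀ i < land.length, ∀ j < (land.getD i []).length,
    i = 0 ∨ 2 ≤ (land.getD (i - 1) []).length ∨
      ((land.getD (i - 1) []).length = 1 ∧ 1 ≤ j)
instance (land : List (List Int)) : Decidable (Pre_solution land) := by
  unfold Pre_solution; infer_instance

def pvWitness_solution : List (List Int) := [[1, 2, 3], [4, 5, 6], [7, 8, 9]]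

def Spec_solution (land : List (List Int)) (out : Int) : Prop := out = solution_alt land
instance (land : List (List Int)) (out : Int) : Decidable (Spec_solution land out) := by
  unfold Spec_solution; infer_instance

-- ===== CLAIM (what is proved, stated in full; the proofs are below) =====
def Claim_equal_solution : Prop :=
  ∀ (land : List (List Int)), Dom_solution land → Pre_solution land →
    Spec_solution land (solution land)

-- ===== LEMMAS AND PROOFS =====

-- the value A adds at column j of a row whose previous (accumulated) row is prev
def cellA (prev : List Int) (j : Nat) : Int :=
  pvMax (PySem.List.slice prev none (some (j : Int)) ++
         PySem.List.slice prev (some ((j : Int) + 1)) none)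

-- A's effect on one row, as a pure function
def stepA (prev row : List Int) : List Int :=
  row.mapIdx (fun j v => v + cellA prev j)

lemma cellA_eq (prev : List Int) (j : Nat) :
    cellA prev j = pvMax (prev.take j ++ prev.drop (j + 1)) := by
  have h1 : ((j : Int) + 1) = ((j + 1 : Nat) : Int) := by push_cast; ring
  unfold cellA
  rw [h1, PySem.List.slice_to_natCast, PySem.List.slice_from_natCast]

lemma pvMax_mem {xs : List Int} (h : xs ≠ []) : pvMax xs ∈ xs := by
  unfold pvMax
  cases hm : PySem.List.max? xs (fun y => y) with
  | none => exact absurd (((PySem.List.max?_eq_none_iff _ _).mp hm)) h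
  | some m => simpa using PySem.List.max?_mem hm

lemma pvMax_isMax {xs : List Int} (y : Int) (hy : y ∈ xs) : y ≤ pvMax xs := by
  unfold pvMax
  cases hm : PySem.List.max? xs (fun y => y) with
  | none => exact absurd (((PySem.List.max?_eq_none_iff _ _).mp hm)) (List.ne_nil_of_mem hy)
  | some m => simpa using PySem.List.max?_isMax hm y hy

lemma pvMax_eq_of_sub {ys prev : List Int} (hsub : ∀ y ∈ ys, y ∈ prev)
    (hm : pvMax prev ∈ ys) : pvMax ys = pvMax prev := by
  have h1 : pvMax ys ≤ pvMax prev :=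
    pvMax_isMax _ (hsub _ (pvMax_mem (List.ne_nil_of_mem hm)))
  have h2 : pvMax prev ≤ pvMax ys := pvMax_isMax _ hm
  omega

-- core: A's per-cell max equals B's max-or-second-max choice
lemma cellA_choice (prev : List Int) (j : Nat)
    (hj : 2 ≤ prev.length ∨ (prev.length = 1 ∧ 1 ≤ j)) :
    cellA prev j =
      (if (j : Int) = (((PySem.List.index? prev (pvMax prev)).getD 0 : Nat) : Int) then
        (if 1 < prev.length then cellA prev ((PySem.List.index? prev (pvMax prev)).getD 0) else 0)
      else pvMax prev) := by
  have hne : prev ≠ [] := by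
    rcases hj with h2 | ⟨h1, _⟩
    · intro h; simp [h] at h2
    · intro h; simp [h] at h1
  obtain ⟨k, hk⟩ : ∃ k, PySem.List.index? prev (pvMax prev) = some k := by
    have := (PySem.List.index?_isSome_iff prev (pvMax prev)).mpr (pvMax_mem hne)
    exact Option.isSome_iff_exists.mp this
  obtain ⟨hklt, hkv, -⟩ := PySem.List.getElem_of_index?_eq_some hk
  rw [hk]
  simp only [Option.getD_some]
  by_cases hji : (j : Int) = (k : Int)
  · have hjk : j = k := by exact_mod_cast hji
    subst hjk
    have h2 : 2 ≤ prev.length := by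
      rcases hj with h2 | ⟨h1, hj1⟩
      · exact h2
      · omega
    have h1 : 1 < prev.length := by omega
    simp [h1]
  · have hjk : j ≠ k := fun h => hji (by exact_mod_cast h)
    rw [if_neg hji, cellA_eq]
    apply pvMax_eq_of_sub
    · intro y hy
      rcases List.mem_append.mp hy with h | h
      · exact List.mem_of_mem_take h
      · exact List.mem_of_mem_drop h
    · rcases Nat.lt_or_gt_of_ne hjk with hlt | hgt
      · -- k > j : pvMax prev sits in the dropped tail
        apply List.mem_append.mpr; right
        have hidx : k - (j + 1) < (prev.drop (j + 1)).length := by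
          simp [List.length_drop]; omega
        have : (prev.drop (j + 1))[k - (j + 1)]'hidx = prev[k] := by
          rw [List.getElem_drop]; congr 1; omega
        rw [← hkv, ← this]; exact List.getElem_mem _
      · -- k < j : pvMax prev sits in the taken prefix
        apply List.mem_append.mpr; left
        have hidx : k < (prev.take j).length := by
          simp [List.length_take]; omega
        have : (prev.take j)[k]'hidx = prev[k] := List.getElem_take
        rw [← hkv, ← this]; exact List.getElem_mem _

lemma stepA_eq_bestRow (prev row : List Int)
    (h : ∀ j < row.length, 2 ≤ prev.length ∨ (prev.length = 1 ∧ 1 ≤ j)) :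
    stepA prev row = pvBestRow prev row := by
  unfold stepA pvBestRow
  apply List.ext_getElem
  · simp [PySem.List.length_enumerate]
  · intro n h1 h2
    have hn : n < row.length := by simpa using h1
    rw [List.getElem_mapIdx, List.getElem_map, PySem.List.getElem_enumerate]
    simp only [zero_add]
    rw [cellA_choice prev n (h n hn)]
    rfl

lemma length_stepA (prev row : List Int) : (stepA prev row).length = row.length := by
  simp [stepA]

-- accumulated rows, A-style
def accRows (p : List Int) : List (List Int) → List (List Int)
  | [] => []
  | r :: rs => stepA p r :: accRows (stepA p r) rs

lemma length_accRows (p : List Int) (t : List (List Int)) :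
    (accRows p t).length = t.length := by
  induction t generalizing p with
  | nil => rfl
  | cons r rs ih => simp [accRows, ih]

lemma accRows_getElem (p : List Int) (t : List (List Int)) (k : Nat) (hk : k < t.length) :
    (accRows p t)[k]'(by rw [length_accRows]; exact hk) =
      stepA ((p :: accRows p t)[k]'(by simp [length_accRows]; omega))
        (t[k]'hk) := by
  induction t generalizing p k with
  | nil => exact absurd hk (by simp)
  | cons r rs ih =>
    cases k with
    | zero => simp [accRows]
    | succ k =>
      have hk' : k < rs.length := by simpa using hk
      simpa [accRows] using ih (stepA p r) k hk'

lemma accRows_last (p : List Int) (t : List (List Int)) :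
    (p :: accRows p t).getLast (by simp) = t.foldl stepA p := by
  induction t generalizing p with
  | nil => rfl
  | cons r rs ih => simpa [accRows, List.getLast_cons] using ih (stepA p r)

-- A's row update truncated to the first n columns
def stepAUpTo (prev row : List Int) (n : Nat) : List Int :=
  row.mapIdx (fun j v => if j < n then v + cellA prev j else v)

lemma stepAUpTo_zero (prev row : List Int) : stepAUpTo prev row 0 = row := by
  apply List.ext_getElem <;> simp [stepAUpTo]

lemma stepAUpTo_full (prev row : List Int) (n : Nat) (hn : row.length ≤ n) :
    stepAUpTo prev row n = stepA prev row := by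
  apply List.ext_getElem
  · simp [stepAUpTo, stepA]
  · intro k h1 h2
    have hk : k < row.length := by simpa [stepAUpTo] using h1
    simp only [stepAUpTo, stepA, List.getElem_mapIdx]
    rw [if_pos (by omega)]

lemma stepAUpTo_succ (prev row : List Int) (n : Nat) (hn : n < row.length) :
    stepAUpTo prev row (n + 1) =
      (stepAUpTo prev row n).set n
        ((stepAUpTo prev row n).getD n 0 + cellA prev n) := by
  have hlen : (stepAUpTo prev row n).length = row.length := by simp [stepAUpTo]
  have hget : (stepAUpTo prev row n).getD n 0 = row[n] := by
    rw [List.getD_eq_getElem _ _ (by omega)]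
    simp [stepAUpTo, List.getElem_mapIdx]
  apply List.ext_getElem
  · simp [stepAUpTo]
  · intro k h1 h2
    have hk : k < row.length := by simpa [stepAUpTo] using h1
    by_cases hkn : n = k
    · subst hkn
      rw [List.getElem_set_self, hget]
      simp [stepAUpTo, List.getElem_mapIdx]
    · rw [List.getElem_set_ne hkn]
      simp only [stepAUpTo, List.getElem_mapIdx]
      split_ifs <;> first | rfl | omega

-- the inner j-loop of A updates row i in place
lemma innerFoldAux (L : List (List Int)) (i : Nat) (hi : i < L.length) (h0 : i ≠ 0)
    (n : Nat) (hn : n ≤ (L.getD i []).length) :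
    (List.range n).foldl (fun L j =>
      if i ≠ 0 then
        let prev := L.getD (i - 1) []
        let row := L.getD i []
        L.set i (row.set j ((row.getD j 0) + cellA prev j))
      else L) L
    = L.set i (stepAUpTo (L.getD (i - 1) []) (L.getD i []) n) := by
  induction n with
  | zero =>
    rw [stepAUpTo_zero, List.getD_eq_getElem _ _ hi, List.set_getElem_self]
    rfl
  | succ n ih =>
    have hn' : n ≤ (L.getD i []).length := by omega
    rw [List.range_succ, List.foldl_append, ih hn']
    simp only [List.foldl_cons, List.foldl_nil, if_pos h0]
    have hii : i ≠ i - 1 := by omega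
    set Sn := stepAUpTo (L.getD (i - 1) []) (L.getD i []) n with hSn
    have hprev : (L.set i Sn).getD (i - 1) [] = L.getD (i - 1) [] := by
      rw [List.getD_eq_getElem?_getD, List.getElem?_set_ne hii, ← List.getD_eq_getElem?_getD]
    have hrow : (L.set i Sn).getD i [] = Sn := by
      rw [List.getD_eq_getElem?_getD, List.getElem?_set_self hi]
      rfl
    rw [hprev, hrow, List.set_set, hSn, ← stepAUpTo_succ _ _ _ (by omega)]

lemma innerFold (L : List (List Int)) (i : Nat) (hi : i < L.length) (h0 : i ≠ 0) :
    (List.range ((L.getD i []).length)).foldl (fun L j =>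
      if i ≠ 0 then
        let prev := L.getD (i - 1) []
        let row := L.getD i []
        L.set i (row.set j ((row.getD j 0) + cellA prev j))
      else L) L
    = L.set i (stepA (L.getD (i - 1) []) (L.getD i [])) := by
  rw [innerFoldAux L i hi h0 _ le_rfl, stepAUpTo_full _ _ _ le_rfl]

lemma pvFoldlConst {α β : Type} (l : List β) (x : α) : l.foldl (fun a _ => a) x = x := by
  induction l generalizing x with
  | nil => rfl
  | cons b l ih => exact ih x

-- one step of A's outer loop, on the invariant state
lemma outerFoldAux (h : List Int) (t : List (List Int)) (k : Nat) (hk : k ≤ t.length + 1) :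
    (List.range k).foldl (fun L i =>
      (List.range ((L.getD i []).length)).foldl (fun L j =>
        if i ≠ 0 then
          let prev := L.getD (i - 1) []
          let row := L.getD i []
          L.set i (row.set j ((row.getD j 0) + cellA prev j))
        else L) L) (h :: t)
    = (h :: accRows h t).take k ++ (h :: t).drop k := by
  induction k with
  | zero => simp
  | succ k ih =>
    rw [List.range_succ, List.foldl_append, ih (by omega)]
    simp only [List.foldl_cons, List.foldl_nil]
    cases k with
    | zero =>
      have hfun : (fun (L : List (List Int)) (j : Nat) =>
          if (0 : Nat) ≠ 0 then
            let prev := L.getD (0 - 1) []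
            let row := L.getD 0 []
            L.set 0 (row.set j ((row.getD j 0) + cellA prev j))
          else L) = fun L _ => L := by
        funext L j; simp
      simp only [List.take_zero, List.drop_zero, List.nil_append, hfun, pvFoldlConst]
      simp
    | succ m =>
      have hm : m < t.length := by omega
      have hA : (h :: accRows h t).length = t.length + 1 := by simp [length_accRows]
      have hLk : ((h :: accRows h t).take (m + 1) ++ (h :: t).drop (m + 1)).length
          = t.length + 1 := by
        simp only [List.length_append, List.length_take, List.length_drop, hA, List.length_cons]
        omega
      have htake : ((h :: accRows h t).take (m + 1)).length = m + 1 := by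
        rw [List.length_take, hA]; omega
      rw [innerFold _ (m + 1) (by rw [hLk]; omega) (by omega)]
      have hAm1 : m + 1 < (h :: accRows h t).length := by rw [hA]; omega
      have hAm : m < (h :: accRows h t).length := by rw [hA]; omega
      have hprevk : ((h :: accRows h t).take (m + 1) ++ (h :: t).drop (m + 1)).getD m []
          = (h :: accRows h t)[m]'hAm := by
        rw [List.getD_eq_getElem?_getD, List.getElem?_append_left (by rw [htake]; omega),
          List.getElem?_take, if_pos (by omega), List.getElem?_eq_getElem hAm]
        rfl
      have hrowk : ((h :: accRows h t).take (m + 1) ++ (h :: t).drop (m + 1)).getD (m + 1) []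
          = t[m]'hm := by
        rw [List.getD_eq_getElem?_getD, List.getElem?_append_right (by rw [htake]), htake,
          List.getElem?_drop]
        have heq : m + 1 + (m + 1 - (m + 1)) = m + 1 := by omega
        rw [heq, List.getElem?_cons_succ, List.getElem?_eq_getElem hm]
        rfl
      have hstep : stepA ((h :: accRows h t)[m]'hAm) (t[m]'hm)
          = (h :: accRows h t)[m + 1]'hAm1 := by
        rw [List.getElem_cons_succ, accRows_getElem h t m hm]
      simp only [Nat.add_sub_cancel]
      rw [hprevk, hrowk, hstep]
      rw [List.set_append_right _ _ (by omega), htake]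
      have hdrop : (h :: t).drop (m + 1) = (h :: t)[m + 1]'(by simp; omega) :: (h :: t).drop (m + 2) :=
        List.drop_eq_getElem_cons (by simp; omega)
      rw [hdrop]
      have : m + 1 - (m + 1) = 0 := by omega
      rw [this, List.set_cons_zero]
      have hmacc : m < (accRows h t).length := by rw [length_accRows]; exact hm
      have hacc : (accRows h t).take (m + 1)
          = (accRows h t).take m ++ [(accRows h t)[m]'hmacc] := by
        rw [List.take_add_one, List.getElem?_eq_getElem hmacc]
        rfl
      simp only [List.take_succ_cons, List.drop_succ_cons, List.getElem_cons_succ]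
      rw [hacc]
      exact List.append_cons _ _ _

-- the outer i-loop of A computes the accumulated rows
lemma outerFold (h : List Int) (t : List (List Int)) :
    (List.range (h :: t : List (List Int)).length).foldl (fun L i =>
      (List.range ((L.getD i []).length)).foldl (fun L j =>
        if i ≠ 0 then
          let prev := L.getD (i - 1) []
          let row := L.getD i []
          L.set i (row.set j ((row.getD j 0) + cellA prev j))
        else L) L) (h :: t)
    = h :: accRows h t := by
  have main := outerFoldAux h t (t.length + 1) le_rfl
  simp only [List.length_cons] at main ⊢
  rw [main, List.drop_of_length_le (by simp), List.take_of_length_le (by simp [length_accRows]),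
    List.append_nil]

-- A's accumulation agrees with B's row step, row by row, under the Pre_ shape condition
lemma foldl_step_eq : ∀ (t : List (List Int)) (h : List Int),
    (∀ i, i < t.length → ∀ j, j < (t.getD i []).length →
      2 ≤ ((h :: t).getD i []).length ∨ (((h :: t).getD i []).length = 1 ∧ 1 ≤ j)) →
    t.foldl stepA h = t.foldl pvBestRow h := by
  intro t
  induction t with
  | nil => intro h _; rfl
  | cons r rs ih =>
    intro h hc
    simp only [List.foldl_cons]
    have h0 : stepA h r = pvBestRow h r :=
      stepA_eq_bestRow h r (fun j hj => by simpa using hc 0 (by simp) j (by simpa using hj))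
    rw [← h0]
    apply ih
    intro i hi j hj
    have hstep := hc (i + 1) (by simpa using hi) j (by simpa using hj)
    cases i with
    | zero => simpa [length_stepA] using hstep
    | succ i => simpa using hstep

-- ===== VERDICT (by name: the statement is the Claim_ definition above) =====
theorem solution_spec : Claim_equal_solution := by
  intro land hdom hpre
  obtain ⟨hne, hlast, hcond⟩ := hpre
  unfold Spec_solution
  cases land with
  | nil => exact absurd rfl hne
  | cons h t =>
    have hA : solution (h :: t)
        = pvMax ((PySem.List.pyGet? (h :: accRows h t) (-1)).getD []) := by
      show pvMax ((PySem.List.pyGet? ((List.range (h :: t : List (List Int)).length).foldl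
          (fun L i =>
            (List.range ((L.getD i []).length)).foldl (fun L j =>
              if i ≠ 0 then
                let prev := L.getD (i - 1) []
                let row := L.getD i []
                L.set i (row.set j ((row.getD j 0) + cellA prev j))
              else L) L) (h :: t)) (-1)).getD [])
          = pvMax ((PySem.List.pyGet? (h :: accRows h t) (-1)).getD [])
      rw [outerFold]
    have hlastA : ((PySem.List.pyGet? (h :: accRows h t) (-1)).getD [])
        = t.foldl stepA h := by
      rw [PySem.List.pyGet?_neg_one,
        List.getLast?_eq_some_getLast (by simp), Option.getD_some, accRows_last]
    have hB : solution_alt (h :: t) = pvMax (t.foldl pvBestRow h) := by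
      show pvMax ((PySem.List.slice (h :: t) (some 1) none).foldl
        (fun prev row => pvBestRow prev row) ((PySem.List.pyGet? (h :: t) 0).getD []))
        = pvMax (t.foldl pvBestRow h)
      rw [PySem.List.slice_from_one, PySem.List.pyGet?_zero_cons]
      rfl
    rw [hA, hlastA, hB]
    congr 1
    apply foldl_step_eq
    intro i hi j hj
    have hstep := hcond (i + 1) (by simpa using hi) j (by simpa using hj)
    rcases hstep with h0 | hok
    · exact absurd h0 (by omega)
    · simpa using hok
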